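-- pv_equiv track=rewrite | github.com/gokeshenzhen/take-root | src/take_root/perf.py | aggregate_runtime_timings
-- ===== SOURCE A (Python) =====
-- def aggregate_runtime_timings(runtime_timings: list[dict[str, int]]) -> dict[str, int]:
--     if not runtime_timings:
--         return {}
--     retry_backoff_ms = 0
--     totals = {
--         "setup_ms": 0,
--         "subprocess_ms": 0,
--         "teardown_ms": 0,
--         "retry_backoff_ms": 0,
--     }
--     for timing in runtime_timings:
--         totals["setup_ms"] += timing.get("setup_ms", 0)
--         totals["subprocess_ms"] += timing.get("subprocess_ms", 0)
--         totals["teardown_ms"] += timing.get("teardown_ms", 0)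
--         retry_backoff_ms = max(retry_backoff_ms, timing.get("retry_backoff_ms", 0))
--     totals["retry_backoff_ms"] = retry_backoff_ms
--     return totals
-- ===== SOURCE B (Python) =====
-- def aggregate_runtime_timings(runtime_timings: list[dict[str, int]]) -> dict[str, int]:
--     if not runtime_timings:
--         return {}
--
--     # Divide-and-conquer: recursively merge (setup, subprocess, teardown, retry) tuples
--     # over halves of the list; correct because + and max are associative.
--     def merge(lo: int, hi: int) -> tuple[int, int, int, int]:
--         if hi - lo == 1:
--             t = runtime_timings[lo]
--             return (t.get("setup_ms", 0), t.get("subprocess_ms", 0),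
--                     t.get("teardown_ms", 0), t.get("retry_backoff_ms", 0))
--         mid = (lo + hi) // 2
--         a = merge(lo, mid)
--         b = merge(mid, hi)
--         return (a[0] + b[0], a[1] + b[1], a[2] + b[2], max(a[3], b[3]))
--
--     s, sub, td, rb = merge(0, len(runtime_timings))
--     return {"setup_ms": s, "subprocess_ms": sub, "teardown_ms": td,
--             "retry_backoff_ms": max(0, rb)}
-- ===== Notes on version B (the rewrite author's own statement) =====
-- stated objective: alternative
-- what changed: Replaces A's single fused left-to-right accumulation loop over a mutable totals dict with a divide-and-conquer recursion that merges (sum,sum,sum,max) tuples over halves of the list, then assembles the dict once; correct because + and max are associative (retry floor 0 applied at the end as A's initialization does).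
import Mathlib
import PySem

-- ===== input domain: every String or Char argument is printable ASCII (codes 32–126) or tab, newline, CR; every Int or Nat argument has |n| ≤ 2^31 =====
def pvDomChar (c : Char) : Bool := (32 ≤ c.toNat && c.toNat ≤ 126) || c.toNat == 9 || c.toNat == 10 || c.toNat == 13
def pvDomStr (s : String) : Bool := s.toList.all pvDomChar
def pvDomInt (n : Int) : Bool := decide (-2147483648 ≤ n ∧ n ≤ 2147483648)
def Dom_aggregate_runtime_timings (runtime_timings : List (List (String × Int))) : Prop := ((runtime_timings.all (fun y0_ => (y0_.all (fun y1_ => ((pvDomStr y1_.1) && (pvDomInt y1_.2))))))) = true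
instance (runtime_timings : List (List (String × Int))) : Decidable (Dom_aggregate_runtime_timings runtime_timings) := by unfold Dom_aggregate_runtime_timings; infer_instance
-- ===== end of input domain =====

-- B replaces A's single fused accumulation loop over a mutable totals dict with a
-- divide-and-conquer recursion merging (sum,sum,sum,max) tuples over halves of the list
-- (alternative decomposition; correct since + and max are associative).

-- shared helper: timing.get(k, 0) on a dict given as an association list (first match)
def pvGet (timing : List (String × Int)) (k : String) : Int :=
  ((timing.find? (fun p => p.1 == k)).map Prod.snd).getD 0

-- ===== PORT A =====
-- loop body: the three '+=' updates on totals and the running max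
def pvStepA (st : PySem.Dict String Int × Int) (timing : List (String × Int)) :
    PySem.Dict String Int × Int :=
  let t1 := st.1.insert "setup_ms" (st.1.getD "setup_ms" 0 + pvGet timing "setup_ms")
  let t2 := t1.insert "subprocess_ms" (t1.getD "subprocess_ms" 0 + pvGet timing "subprocess_ms")
  let t3 := t2.insert "teardown_ms" (t2.getD "teardown_ms" 0 + pvGet timing "teardown_ms")
  (t3, max st.2 (pvGet timing "retry_backoff_ms"))

def aggregate_runtime_timings (runtime_timings : List (List (String × Int))) : List (String × Int) :=
  if runtime_timings = [] then []
  else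
    let totals0 : PySem.Dict String Int :=
      PySem.Dict.ofList [("setup_ms", 0), ("subprocess_ms", 0), ("teardown_ms", 0), ("retry_backoff_ms", 0)]
    let res := runtime_timings.foldl pvStepA (totals0, 0)
    (res.1.insert "retry_backoff_ms" res.2).items

-- ===== PORT B =====
-- merge(lo, hi): divide-and-conquer over index range [lo, hi) of the list.
-- Indices are Nat (Python only ever uses nonnegative ones here); the base-case guard
-- 'hi - lo ≤ 1' merely totalises the recursion (Python never reaches hi ≤ lo), and
-- runtime_timings[lo] is in range whenever called, so getD's default is never used.
def pvMerge (rt : List (List (String × Int))) (lo hi : Nat) : Int × Int × Int × Int :=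
  if hi - lo ≤ 1 then
    let t := rt.getD lo []
    (pvGet t "setup_ms", pvGet t "subprocess_ms", pvGet t "teardown_ms", pvGet t "retry_backoff_ms")
  else
    let mid := (lo + hi) / 2
    let a := pvMerge rt lo mid
    let b := pvMerge rt mid hi
    (a.1 + b.1, a.2.1 + b.2.1, a.2.2.1 + b.2.2.1, max a.2.2.2 b.2.2.2)
termination_by hi - lo
decreasing_by all_goals omega

def aggregate_runtime_timings_alt (runtime_timings : List (List (String × Int))) : List (String × Int) :=
  if runtime_timings = [] then []
  else
    let r := pvMerge runtime_timings 0 runtime_timings.length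
    [("setup_ms", r.1), ("subprocess_ms", r.2.1), ("teardown_ms", r.2.2.1),
     ("retry_backoff_ms", max 0 r.2.2.2)]

-- ===== PRECONDITION & SPEC =====
def Spec_aggregate_runtime_timings (runtime_timings : List (List (String × Int))) (out : List (String × Int)) : Prop := out = aggregate_runtime_timings_alt runtime_timings
instance (runtime_timings : List (List (String × Int))) (out : List (String × Int)) : Decidable (Spec_aggregate_runtime_timings runtime_timings out) := by unfold Spec_aggregate_runtime_timings; infer_instance

-- ===== CLAIM =====
def Claim_equal_aggregate_runtime_timings : Prop := ∀ (runtime_timings : List (List (String × Int))), Dom_aggregate_runtime_timings runtime_timings → Spec_aggregate_runtime_timings runtime_timings (aggregate_runtime_timings runtime_timings)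

-- ===== LEMMAS AND PROOFS =====

-- pure maximum of a nonempty list (0 for [])
def pvPm : List Int → Int
  | [] => 0
  | x :: xs => xs.foldl max x

theorem pvFoldl_max_eq (l : List Int) (hl : l ≠ []) :
    ∀ a : Int, l.foldl max a = max a (pvPm l) := by
  induction l with
  | nil => exact absurd rfl hl
  | cons x xs ih =>
      intro a
      cases hxs : xs with
      | nil => simp [pvPm]
      | cons y ys =>
          have hne : xs ≠ [] := by simp [hxs]
          subst hxs
          have h1 := ih hne (max a x)
          have h2 := ih hne x
          simp only [List.foldl_cons, pvPm] at *
          rw [h1, h2, max_assoc]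

theorem pvPm_append (a b : List Int) (ha : a ≠ []) (hb : b ≠ []) :
    pvPm (a ++ b) = max (pvPm a) (pvPm b) := by
  cases a with
  | nil => exact absurd rfl ha
  | cons x xs =>
      calc pvPm (x :: xs ++ b) = (xs ++ b).foldl max x := rfl
        _ = b.foldl max (xs.foldl max x) := by rw [List.foldl_append]
        _ = max (xs.foldl max x) (pvPm b) := pvFoldl_max_eq b hb _
        _ = max (pvPm (x :: xs)) (pvPm b) := rfl

-- the per-segment specification of pvMerge
def pvSums (xs : List (List (String × Int))) : Int × Int × Int × Int :=
  ((xs.map (pvGet · "setup_ms")).sum,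
   (xs.map (pvGet · "subprocess_ms")).sum,
   (xs.map (pvGet · "teardown_ms")).sum,
   pvPm (xs.map (pvGet · "retry_backoff_ms")))

theorem pvMerge_eq (rt : List (List (String × Int))) :
    ∀ n lo hi, hi - lo = n → lo < hi → hi ≤ rt.length →
      pvMerge rt lo hi = pvSums ((rt.drop lo).take (hi - lo)) := by
  intro n
  induction n using Nat.strong_induction_on with
  | _ n ih =>
      intro lo hi hn hlt hle
      by_cases h1 : hi - lo ≤ 1
      · -- base case: hi - lo = 1
        have hhi : hi = lo + 1 := by omega
        have hlo : lo < rt.length := by omega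
        rw [pvMerge]
        simp only [h1, if_pos]
        have hdrop : rt.drop lo = rt[lo] :: rt.drop (lo + 1) :=
          List.drop_eq_getElem_cons hlo
        have hget : rt.getD lo [] = rt[lo] := List.getD_eq_getElem rt [] hlo
        rw [hget]
        have : hi - lo = 1 := by omega
        rw [this, hdrop, List.take_succ_cons, List.take_zero]
        simp [pvSums, pvPm]
      · -- recursive case
        have h2 : 2 ≤ hi - lo := by omega
        rw [pvMerge]
        simp only [h1, if_neg, not_false_iff]
        have hb1 : lo < (lo + hi) / 2 := by omega
        have hb2 : (lo + hi) / 2 < hi := by omega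
        generalize hmid : (lo + hi) / 2 = mid at *
        rw [ih (mid - lo) (by omega) lo mid rfl hb1 (by omega),
            ih (hi - mid) (by omega) mid hi rfl hb2 hle]
        have hsplit : (rt.drop lo).take (hi - lo) =
            (rt.drop lo).take (mid - lo) ++ (rt.drop mid).take (hi - mid) := by
          have h3 : hi - lo = (mid - lo) + (hi - mid) := by omega
          rw [h3, List.take_add]
          congr 1
          rw [List.drop_drop]
          have h4 : lo + (mid - lo) = mid := by omega
          rw [h4]
        rw [hsplit]
        have hlen1 : ((rt.drop lo).take (mid - lo)).length = mid - lo := by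
          rw [List.length_take, List.length_drop]; omega
        have hlen2 : ((rt.drop mid).take (hi - mid)).length = hi - mid := by
          rw [List.length_take, List.length_drop]; omega
        have hne1 : (rt.drop lo).take (mid - lo) ≠ [] :=
          List.ne_nil_of_length_pos (by omega)
        have hne2 : (rt.drop mid).take (hi - mid) ≠ [] :=
          List.ne_nil_of_length_pos (by omega)
        simp only [pvSums, List.map_append, List.sum_append]
        rw [pvPm_append _ _ (by simpa using hne1) (by simpa using hne2)]

-- the totals dict after A's loop, as a literal
def pvD (a b c : Int) : PySem.Dict String Int :=
  PySem.Dict.mk [("setup_ms", a), ("subprocess_ms", b), ("teardown_ms", c), ("retry_backoff_ms", 0)]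

theorem pvStepA_eq (a b c r : Int) (t : List (String × Int)) :
    pvStepA (pvD a b c, r) t =
      (pvD (a + pvGet t "setup_ms") (b + pvGet t "subprocess_ms") (c + pvGet t "teardown_ms"),
       max r (pvGet t "retry_backoff_ms")) := by
  rfl

theorem pvLoop_inv (ts : List (List (String × Int))) :
    ∀ (a b c r : Int),
      ts.foldl pvStepA (pvD a b c, r) =
        (pvD (a + (ts.map (pvGet · "setup_ms")).sum)
             (b + (ts.map (pvGet · "subprocess_ms")).sum)
             (c + (ts.map (pvGet · "teardown_ms")).sum),
         (ts.map (pvGet · "retry_backoff_ms")).foldl max r) := by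
  induction ts with
  | nil => intro a b c r; simp
  | cons t ts ih =>
      intro a b c r
      simp only [List.foldl_cons, pvStepA_eq, ih, List.map_cons, List.sum_cons, List.foldl_cons]
      simp [pvD, add_assoc]

-- ===== VERDICT =====
theorem aggregate_runtime_timings_spec : Claim_equal_aggregate_runtime_timings := by
  intro ts _
  unfold Spec_aggregate_runtime_timings aggregate_runtime_timings aggregate_runtime_timings_alt
  by_cases h : ts = []
  · simp [h]
  · simp only [h, ite_false]
    have hlen : 0 < ts.length := List.length_pos_iff.mpr h
    have h0 : (PySem.Dict.ofList [("setup_ms", (0:Int)), ("subprocess_ms", 0), ("teardown_ms", 0), ("retry_backoff_ms", 0)]) = pvD 0 0 0 := by rfl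
    rw [h0, pvLoop_inv ts 0 0 0 0,
        pvMerge_eq ts ts.length 0 ts.length rfl hlen le_rfl]
    have hmapne : ts.map (pvGet · "retry_backoff_ms") ≠ [] := by
      simpa using h
    rw [pvFoldl_max_eq _ hmapne 0]
    simp [pvSums, pvD, PySem.Dict.insert]
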